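-- pv_equiv track=rewrite | github.com/languageseed/osf | backend/src/api/simulation.py | _triage_priority
-- ===== SOURCE A (Python) =====
-- def _triage_priority(feedback_type: str, description: str) -> str:
--     """Simple priority assignment for demo."""
--     text = description.lower()
--
--     if feedback_type == "bug":
--         if any(word in text for word in ["crash", "error", "broken", "not working", "urgent"]):
--             return "critical"
--         elif any(word in text for word in ["issue", "problem", "bug"]):
--             return "high"
--         else:
--             return "medium"
--     else:  # enhancement, question
--         if any(word in text for word in ["important", "need", "must have", "critical"]):
--             return "high"
--         elif any(word in text for word in ["would be nice", "could", "maybe"]):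
--             return "low"
--         else:
--             return "medium"
-- ===== SOURCE B (Python) =====
-- def _triage_priority(feedback_type: str, description: str) -> str:
--     """Flat keyword->(rank,label) map; aggregate ALL matches and keep the best-ranked one."""
--     if feedback_type == "bug":
--         kw = {"crash": (0, "critical"), "error": (0, "critical"), "broken": (0, "critical"),
--               "not working": (0, "critical"), "urgent": (0, "critical"),
--               "issue": (1, "high"), "problem": (1, "high"), "bug": (1, "high")}
--     else:
--         kw = {"important": (0, "high"), "need": (0, "high"), "must have": (0, "high"),
--               "critical": (0, "high"),
--               "would be nice": (1, "low"), "could": (1, "low"), "maybe": (1, "low")}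
--     text = description.lower()
--     hits = [v for k, v in kw.items() if k in text]
--     return min(hits, key=lambda v: v[0])[1] if hits else "medium"
-- ===== Notes on version B (the rewrite author's own statement) =====
-- stated objective: alternative
-- what changed: Replaces A's ordered if/elif group checks (short-circuit per priority tier) with a flat keyword->(rank,label) map: collect ALL matching keywords in one pass and return the label of the minimum-rank hit, defaulting to 'medium'.
import Mathlib
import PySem

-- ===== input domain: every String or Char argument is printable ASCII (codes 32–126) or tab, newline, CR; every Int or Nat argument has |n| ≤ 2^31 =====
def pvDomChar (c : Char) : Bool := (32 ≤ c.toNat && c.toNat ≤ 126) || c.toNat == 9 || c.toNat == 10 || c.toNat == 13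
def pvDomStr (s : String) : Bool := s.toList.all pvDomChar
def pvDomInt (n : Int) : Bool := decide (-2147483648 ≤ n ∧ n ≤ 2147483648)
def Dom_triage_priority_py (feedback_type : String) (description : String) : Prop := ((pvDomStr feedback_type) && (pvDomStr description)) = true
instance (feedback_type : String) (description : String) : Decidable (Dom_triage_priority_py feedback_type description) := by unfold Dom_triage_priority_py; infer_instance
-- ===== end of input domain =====

-- B replaces A's ordered if/elif tier checks with a flat keyword->(rank,label) map:
-- it collects every matching keyword and returns the label of the minimum-rank hit
-- ('medium' if none); equivalent because ranks mirror A's tier order. No speed claim.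

-- ===== PORT A =====
def triage_priority_py (feedback_type : String) (description : String) : String :=
  let text := PySem.Str.lower description
  if feedback_type == "bug" then
    if (["crash", "error", "broken", "not working", "urgent"].any
        (fun word => PySem.Str.isIn word text)) then "critical"
    else if (["issue", "problem", "bug"].any (fun word => PySem.Str.isIn word text)) then "high"
    else "medium"
  else
    if (["important", "need", "must have", "critical"].any
        (fun word => PySem.Str.isIn word text)) then "high"
    else if (["would be nice", "could", "maybe"].any (fun word => PySem.Str.isIn word text)) then "low"
    else "medium"

-- ===== PORT B =====
def triage_priority_py_alt (feedback_type : String) (description : String) : String :=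
  let kw : List (String × (Nat × String)) :=
    if feedback_type == "bug" then
      [("crash", (0, "critical")), ("error", (0, "critical")), ("broken", (0, "critical")),
       ("not working", (0, "critical")), ("urgent", (0, "critical")),
       ("issue", (1, "high")), ("problem", (1, "high")), ("bug", (1, "high"))]
    else
      [("important", (0, "high")), ("need", (0, "high")), ("must have", (0, "high")),
       ("critical", (0, "high")),
       ("would be nice", (1, "low")), ("could", (1, "low")), ("maybe", (1, "low"))]
  let text := PySem.Str.lower description
  let hits := (kw.filter (fun p => PySem.Str.isIn p.1 text)).map (fun p => p.2)
  match PySem.List.min? hits (fun v => v.1) with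
  | some v => v.2
  | none => "medium"

-- ===== PRECONDITION & SPEC =====
def Spec_triage_priority_py (feedback_type : String) (description : String) (out : String) : Prop := out = triage_priority_py_alt feedback_type description
instance (feedback_type : String) (description : String) (out : String) : Decidable (Spec_triage_priority_py feedback_type description out) := by unfold Spec_triage_priority_py; infer_instance

-- ===== CLAIM (what is proved, stated in full; the proofs are below) =====
def Claim_equal_triage_priority_py : Prop := ∀ (feedback_type : String) (description : String), Dom_triage_priority_py feedback_type description → Spec_triage_priority_py feedback_type description (triage_priority_py feedback_type description)

-- ===== LEMMAS AND PROOFS =====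

-- ===== VERDICT (by name: the statement is the Claim_ definition above) =====
-- map-after-filter depends only on each element's test result and mapped value
lemma mapSnd_filter {α β : Type} (p : α → Bool) (f : α → β) (l : List α) :
    List.map f (List.filter p l) =
    List.map Prod.snd (List.filter (fun q => q.1) (List.map (fun a => (p a, f a)) l)) := by
  induction l with
  | nil => rfl
  | cons a t ih => cases hpa : p a <;> simp [hpa, ih]

-- both branch shapes, abstracted over the eight/seven keyword-match booleans
lemma triage_bug_bool : ∀ (b1 b2 b3 b4 b5 b6 b7 b8 : Bool),
    (if (b1 || (b2 || (b3 || (b4 || (b5 || false))))) then "critical"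
     else if (b6 || (b7 || (b8 || false))) then "high" else "medium") =
    (match PySem.List.min?
        (List.map Prod.snd (List.filter (fun q => q.1)
          [(b1, ((0 : Nat), "critical")), (b2, (0, "critical")), (b3, (0, "critical")),
           (b4, (0, "critical")), (b5, (0, "critical")),
           (b6, (1, "high")), (b7, (1, "high")), (b8, (1, "high"))]))
        (fun v => v.1) with
     | some v => v.2
     | none => "medium") := by
  decide

lemma triage_other_bool : ∀ (b1 b2 b3 b4 b5 b6 b7 : Bool),
    (if (b1 || (b2 || (b3 || (b4 || false)))) then "high"
     else if (b5 || (b6 || (b7 || false))) then "low" else "medium") =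
    (match PySem.List.min?
        (List.map Prod.snd (List.filter (fun q => q.1)
          [(b1, ((0 : Nat), "high")), (b2, (0, "high")), (b3, (0, "high")), (b4, (0, "high")),
           (b5, (1, "low")), (b6, (1, "low")), (b7, (1, "low"))]))
        (fun v => v.1) with
     | some v => v.2
     | none => "medium") := by
  decide

-- ===== VERDICT (by name: the statement is the Claim_ definition above) =====
theorem triage_priority_py_spec : Claim_equal_triage_priority_py := by
  intro feedback_type description _
  unfold Spec_triage_priority_py triage_priority_py triage_priority_py_alt
  by_cases h : feedback_type == "bug"
  · simp only [h, if_true, List.any_cons, List.any_nil,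
      mapSnd_filter (fun p : String × Nat × String => PySem.Str.isIn p.1 (PySem.Str.lower description))
        (fun p : String × Nat × String => p.2),
      List.map_cons, List.map_nil]
    exact triage_bug_bool _ _ _ _ _ _ _ _
  · simp only [h, Bool.false_eq_true, if_false, List.any_cons, List.any_nil,
      mapSnd_filter (fun p : String × Nat × String => PySem.Str.isIn p.1 (PySem.Str.lower description))
        (fun p : String × Nat × String => p.2),
      List.map_cons, List.map_nil]
    exact triage_other_bool _ _ _ _ _ _ _
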